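-- pv_equiv track=rewrite | github.com/Tinkybala/sudoku-solver | constraints.py | get_inequality_constraints
-- ===== SOURCE A (Python) =====
-- import math
-- from typing import List, Tuple
--
-- def get_inequality_constraints(grid: List[List[int]]) -> List[Tuple[str, str]]:
--     """
--     Determines the inequality constraints of a n x n sudoku grid.
--
--     Args:
--         grid (List[List[int]]): n x n sudoku grid
--
--     Returns:
--         List[Tuple[int, int]]: A list of tuples, each tuples containing two cells which should
--                                not be equal. Example: [("1-1","1-2")] has only one constraint between
--                                the cells 1-1 and 1-2.
--     """
--     constraints = set([])
--     region_size = math.isqrt(len(grid))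
--     proper_sudoku = True if region_size**2 == len(grid) else False
--     for row_i in range(len(grid)):
--         for col_i in range(len(grid)):
--             cols = list(range(0,col_i)) + list(range(col_i+1, len(grid)))
--             rows = list(range(0, row_i)) + list(range(row_i+1, len(grid)))
--             for c in cols:
--                 constraints.add(tuple(sorted((f"{row_i+1}-{col_i+1}",f"{row_i+1}-{c+1}"))))
--             for r in rows:
--                 constraints.add(tuple(sorted((f"{row_i+1}-{col_i+1}",f"{r+1}-{col_i+1}"))))
--             if proper_sudoku:
--                 top_left_row = (row_i)//region_size * region_size
--                 top_left_col = (col_i)//region_size * region_size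
--                 for i in range(region_size):
--                     for j in range(region_size):
--                         if top_left_row + i != row_i or top_left_col + j != col_i:
--                             constraints.add(tuple(sorted((f"{row_i+1}-{col_i+1}", f"{top_left_row + i + 1}-{top_left_col + j + 1}"))))
--
--     constraints = sorted(list(constraints))
--
--     return constraints
-- ===== SOURCE B (Python) =====
-- import math
-- from typing import List, Tuple
--
-- def _add_pair(constraints, a, b):
--     constraints.add((b, a) if b < a else (a, b))
--
-- def get_inequality_constraints(grid: List[List[int]]) -> List[Tuple[str, str]]:
--     """Per-group pairwise enumeration: each row, column and (for perfect-square
--     sizes) box contributes every unordered pair of its cells exactly once."""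
--     n = len(grid)
--     s = math.isqrt(n)
--     constraints = set()
--     for r in range(n):                       # rows
--         for c1 in range(n):
--             for c2 in range(c1 + 1, n):
--                 _add_pair(constraints, f"{r+1}-{c1+1}", f"{r+1}-{c2+1}")
--     for c in range(n):                       # columns
--         for r1 in range(n):
--             for r2 in range(r1 + 1, n):
--                 _add_pair(constraints, f"{r1+1}-{c+1}", f"{r2+1}-{c+1}")
--     if s * s == n:                           # boxes, only for a proper sudoku size
--         for br in range(s):
--             for bc in range(s):
--                 for k1 in range(s * s):
--                     for k2 in range(k1 + 1, s * s):
--                         i1, j1 = k1 // s, k1 % s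
--                         i2, j2 = k2 // s, k2 % s
--                         _add_pair(constraints,
--                                   f"{br*s+i1+1}-{bc*s+j1+1}",
--                                   f"{br*s+i2+1}-{bc*s+j2+1}")
--     return sorted(constraints)
-- ===== Notes on version B (the rewrite author's own statement) =====
-- stated objective: alternative
-- what changed: A scans every cell's row/column/box neighbours (visiting each constraint twice and relying on set dedup); B iterates over the structural groups (rows, columns, and boxes when the size is a perfect square) and adds each unordered pair of group cells exactly once via triangular index loops.
import Mathlib
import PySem

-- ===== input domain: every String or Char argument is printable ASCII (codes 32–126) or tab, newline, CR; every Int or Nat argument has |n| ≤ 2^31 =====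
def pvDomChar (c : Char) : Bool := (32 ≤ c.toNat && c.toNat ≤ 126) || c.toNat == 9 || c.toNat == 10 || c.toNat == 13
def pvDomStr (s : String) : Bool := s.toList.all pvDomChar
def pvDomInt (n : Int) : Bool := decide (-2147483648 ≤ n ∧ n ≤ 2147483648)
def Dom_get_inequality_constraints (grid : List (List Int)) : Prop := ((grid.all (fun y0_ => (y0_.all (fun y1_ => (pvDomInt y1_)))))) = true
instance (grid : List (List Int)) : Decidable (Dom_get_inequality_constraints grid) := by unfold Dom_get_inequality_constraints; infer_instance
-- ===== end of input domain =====

-- B replaces A's per-cell neighbour scan (each pair met twice) by a per-group (row/column/box)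
-- enumeration of each unordered pair once: a different decomposition of the same task.

-- ===== PORT A =====
-- f"{r+1}-{c+1}"  (str(r+1) + "-" + str(c+1); both sources build exactly this label)
def pvLab (r c : Int) : String := PySem.Int.toStr (r + 1) ++ "-" ++ PySem.Int.toStr (c + 1)

-- tuple(sorted((x, y))): exact for a two-element sort (stable; Python's '<' on str = Lean's '<' on String)
def pvPairSorted (x y : String) : String × String := if y < x then (y, x) else (x, y)

-- the 'if proper_sudoku:' block of A's cell loop
def pvABoxStep (rs row_i col_i : Int) (s : PySem.Set (String × String)) : PySem.Set (String × String) :=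
  let tlr := PySem.Int.floordiv row_i rs * rs
  let tlc := PySem.Int.floordiv col_i rs * rs
  (PySem.List.pyRange 0 rs 1).foldl (fun s i =>
    (PySem.List.pyRange 0 rs 1).foldl (fun s j =>
      if tlr + i ≠ row_i ∨ tlc + j ≠ col_i then
        PySem.Set.add s (pvPairSorted (pvLab row_i col_i) (pvLab (tlr + i) (tlc + j)))
      else s) s) s

-- the body of A's inner (col_i) loop
def pvACell (n rs : Int) (proper : Bool) (s : PySem.Set (String × String)) (row_i col_i : Int) :
    PySem.Set (String × String) :=
  let cols := PySem.List.pyRange 0 col_i 1 ++ PySem.List.pyRange (col_i + 1) n 1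
  let rows := PySem.List.pyRange 0 row_i 1 ++ PySem.List.pyRange (row_i + 1) n 1
  let s := cols.foldl (fun s c => PySem.Set.add s (pvPairSorted (pvLab row_i col_i) (pvLab row_i c))) s
  let s := rows.foldl (fun s r => PySem.Set.add s (pvPairSorted (pvLab row_i col_i) (pvLab r col_i))) s
  if proper then pvABoxStep rs row_i col_i s else s

def get_inequality_constraints (grid : List (List Int)) : List (String × String) :=
  let n := PySem.List.len grid
  let region_size : Int := (Nat.sqrt grid.length : Int)  -- math.isqrt(len(grid)): exact, the argument is ≥ 0
  let proper : Bool := region_size ^ 2 == n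
  let constraints :=
    (PySem.List.pyRange 0 n 1).foldl (fun s row_i =>
      (PySem.List.pyRange 0 n 1).foldl (fun s col_i =>
        pvACell n region_size proper s row_i col_i) s) PySem.Set.empty
  PySem.List.sorted2 constraints Prod.fst Prod.snd

-- ===== PORT B =====
-- _add_pair(constraints, a, b): add (b, a) if b < a else (a, b)
def pvAddPair (s : PySem.Set (String × String)) (a b : String) : PySem.Set (String × String) :=
  PySem.Set.add s (if b < a then (b, a) else (a, b))

-- B's box block: every unordered pair of cells of every box, each once
def pvBBoxes (rs : Int) (s0 : PySem.Set (String × String)) : PySem.Set (String × String) :=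
  (PySem.List.pyRange 0 rs 1).foldl (fun s br =>
    (PySem.List.pyRange 0 rs 1).foldl (fun s bc =>
      (PySem.List.pyRange 0 (rs * rs) 1).foldl (fun s k1 =>
        (PySem.List.pyRange (k1 + 1) (rs * rs) 1).foldl (fun s k2 =>
          pvAddPair s
            (pvLab (br * rs + PySem.Int.floordiv k1 rs) (bc * rs + PySem.Int.mod k1 rs))
            (pvLab (br * rs + PySem.Int.floordiv k2 rs) (bc * rs + PySem.Int.mod k2 rs))) s) s) s) s0

def get_inequality_constraints_alt (grid : List (List Int)) : List (String × String) :=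
  let n := PySem.List.len grid
  let s : Int := (Nat.sqrt grid.length : Int)  -- math.isqrt(len(grid)): exact, the argument is ≥ 0
  let afterRows :=
    (PySem.List.pyRange 0 n 1).foldl (fun acc r =>
      (PySem.List.pyRange 0 n 1).foldl (fun acc c1 =>
        (PySem.List.pyRange (c1 + 1) n 1).foldl (fun acc c2 =>
          pvAddPair acc (pvLab r c1) (pvLab r c2)) acc) acc) PySem.Set.empty
  let afterCols :=
    (PySem.List.pyRange 0 n 1).foldl (fun acc c =>
      (PySem.List.pyRange 0 n 1).foldl (fun acc r1 =>
        (PySem.List.pyRange (r1 + 1) n 1).foldl (fun acc r2 =>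
          pvAddPair acc (pvLab r1 c) (pvLab r2 c)) acc) acc) afterRows
  let afterBoxes := if s * s == n then pvBBoxes s afterCols else afterCols
  PySem.List.sorted2 afterBoxes Prod.fst Prod.snd

-- ===== PRECONDITION & SPEC =====
def Spec_get_inequality_constraints (grid : List (List Int)) (out : List (String × String)) : Prop := out = get_inequality_constraints_alt grid
instance (grid : List (List Int)) (out : List (String × String)) : Decidable (Spec_get_inequality_constraints grid out) := by unfold Spec_get_inequality_constraints; infer_instance

-- ===== CLAIM (what is proved, stated in full; the proofs are below) =====
def Claim_equal_get_inequality_constraints : Prop := ∀ (grid : List (List Int)), Dom_get_inequality_constraints grid → Spec_get_inequality_constraints grid (get_inequality_constraints grid)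

-- ===== LEMMAS AND PROOFS =====

-- generic: membership in a fold that only ever grows its accumulator
theorem pv_mem_foldl_iff {α β : Type} (step : List α → β → List α) (Q : β → α → Prop)
    (h : ∀ s e x, x ∈ step s e ↔ x ∈ s ∨ Q e x) :
    ∀ (l : List β) (init : List α) (x : α),
      x ∈ l.foldl step init ↔ x ∈ init ∨ ∃ e ∈ l, Q e x := by
  intro l
  induction l with
  | nil => simp
  | cons e t ih =>
    intro init x
    simp only [List.foldl_cons, ih, h, List.mem_cons]
    constructor
    · rintro ((hx | hq) | ⟨e', he', hq⟩)
      · exact Or.inl hx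
      · exact Or.inr ⟨e, Or.inl rfl, hq⟩
      · exact Or.inr ⟨e', Or.inr he', hq⟩
    · rintro (hx | ⟨e', (rfl | he'), hq⟩)
      · exact Or.inl (Or.inl hx)
      · exact Or.inl (Or.inr hq)
      · exact Or.inr ⟨e', he', hq⟩

-- generic: a fold whose step preserves Nodup
theorem pv_nodup_foldl {α β : Type} (step : List α → β → List α)
    (h : ∀ s e, s.Nodup → (step s e).Nodup) :
    ∀ (l : List β) (init : List α), init.Nodup → (l.foldl step init).Nodup := by
  intro l
  induction l with
  | nil => simpa using fun _ h => h
  | cons e t ih => intro init hinit; exact ih _ (h _ _ hinit)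

theorem pvPairSorted_comm (a b : String) : pvPairSorted a b = pvPairSorted b a := by
  unfold pvPairSorted
  rcases lt_trichotomy a b with h | rfl | h
  · rw [if_neg (asymm h), if_pos h]
  · simp
  · rw [if_pos h, if_neg (asymm h)]


-- sorted(list-of-pairs) is a sort under the lexicographic order on pairs
theorem pv_sorted2_lex {α β : Type} [LinearOrder α] [LinearOrder β] (xs : List (α × β)) :
    PySem.List.sorted2 xs Prod.fst Prod.snd = PySem.List.sorted xs (fun p => toLex p) := by
  have hb : (fun (a b : α × β) => decide (a.1 < b.1) || (!decide (b.1 < a.1) && decide (a.2 < b.2)))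
      = fun a b => decide ((toLex a : Lex (α × β)) < toLex b) := by
    funext a b
    rcases lt_trichotomy a.1 b.1 with h | h | h
    · simp [Prod.Lex.lt_iff, h, asymm h]
    · simp [Prod.Lex.lt_iff, h]
    · simp [Prod.Lex.lt_iff, h, asymm h, not_lt_of_gt]
  simp only [PySem.List.sorted2, PySem.List.sorted]
  rw [hb]
  simp

theorem pvAddPair_eq (s : PySem.Set (String × String)) (a b : String) :
    pvAddPair s a b = PySem.Set.add s (pvPairSorted a b) := rfl

-- the three kinds of constraints, phrased group-wise (B's shape)
def MRow (n : Int) (p : String × String) : Prop :=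
  ∃ r c c' : Int, 0 ≤ r ∧ r < n ∧ 0 ≤ c ∧ c < c' ∧ c' < n ∧
    p = pvPairSorted (pvLab r c) (pvLab r c')

def MCol (n : Int) (p : String × String) : Prop :=
  ∃ c r r' : Int, 0 ≤ c ∧ c < n ∧ 0 ≤ r ∧ r < r' ∧ r' < n ∧
    p = pvPairSorted (pvLab r c) (pvLab r' c)

def MBox (rs : Int) (p : String × String) : Prop :=
  ∃ br bc k1 k2 : Int, 0 ≤ br ∧ br < rs ∧ 0 ≤ bc ∧ bc < rs ∧
    0 ≤ k1 ∧ k1 < k2 ∧ k2 < rs * rs ∧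
    p = pvPairSorted
      (pvLab (br * rs + PySem.Int.floordiv k1 rs) (bc * rs + PySem.Int.mod k1 rs))
      (pvLab (br * rs + PySem.Int.floordiv k2 rs) (bc * rs + PySem.Int.mod k2 rs))

-- what A's cell (r, c) contributes
def QA (n rs : Int) (proper : Bool) (r c : Int) (p : String × String) : Prop :=
  (∃ c', ((0 ≤ c' ∧ c' < c) ∨ (c + 1 ≤ c' ∧ c' < n)) ∧
      p = pvPairSorted (pvLab r c) (pvLab r c'))
  ∨ (∃ r', ((0 ≤ r' ∧ r' < r) ∨ (r + 1 ≤ r' ∧ r' < n)) ∧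
      p = pvPairSorted (pvLab r c) (pvLab r' c))
  ∨ (proper = true ∧ ∃ i, (0 ≤ i ∧ i < rs) ∧ ∃ j, (0 ≤ j ∧ j < rs) ∧
      ((PySem.Int.floordiv r rs * rs + i ≠ r ∨ PySem.Int.floordiv c rs * rs + j ≠ c) ∧
       p = pvPairSorted (pvLab r c)
        (pvLab (PySem.Int.floordiv r rs * rs + i) (PySem.Int.floordiv c rs * rs + j))))

theorem pv_mem_ABox (rs r c : Int) (s : PySem.Set (String × String)) (p : String × String) :
    p ∈ pvABoxStep rs r c s ↔ p ∈ s ∨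
      (∃ i, (0 ≤ i ∧ i < rs) ∧ ∃ j, (0 ≤ j ∧ j < rs) ∧
        ((PySem.Int.floordiv r rs * rs + i ≠ r ∨ PySem.Int.floordiv c rs * rs + j ≠ c) ∧
         p = pvPairSorted (pvLab r c)
          (pvLab (PySem.Int.floordiv r rs * rs + i) (PySem.Int.floordiv c rs * rs + j)))) := by
  unfold pvABoxStep
  rw [pv_mem_foldl_iff _
    (fun i x => ∃ j, (0 ≤ j ∧ j < rs) ∧
      ((PySem.Int.floordiv r rs * rs + i ≠ r ∨ PySem.Int.floordiv c rs * rs + j ≠ c) ∧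
       x = pvPairSorted (pvLab r c)
        (pvLab (PySem.Int.floordiv r rs * rs + i) (PySem.Int.floordiv c rs * rs + j))))
    (fun s' i x => by
      rw [pv_mem_foldl_iff _
        (fun j x => (PySem.Int.floordiv r rs * rs + i ≠ r ∨ PySem.Int.floordiv c rs * rs + j ≠ c) ∧
          x = pvPairSorted (pvLab r c)
            (pvLab (PySem.Int.floordiv r rs * rs + i) (PySem.Int.floordiv c rs * rs + j)))
        (fun s'' j x => by
          split_ifs with hcond
          · rw [PySem.Set.mem_add]
            constructor
            · rintro (h | h)
              · exact Or.inl h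
              · exact Or.inr ⟨hcond, h⟩
            · rintro (h | ⟨_, h⟩)
              · exact Or.inl h
              · exact Or.inr h
          · constructor
            · exact Or.inl
            · rintro (h | ⟨hor, _⟩)
              · exact h
              · exact absurd hor hcond)]
      simp only [PySem.List.mem_pyRange_one])]
  simp only [PySem.List.mem_pyRange_one]

theorem pv_mem_ACell (n rs : Int) (proper : Bool) (r c : Int)
    (s : PySem.Set (String × String)) (p : String × String) :
    p ∈ pvACell n rs proper s r c ↔ p ∈ s ∨ QA n rs proper r c p := by
  unfold pvACell QA
  have hcols : ∀ (s' : PySem.Set (String × String)),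
      p ∈ (PySem.List.pyRange 0 c 1 ++ PySem.List.pyRange (c + 1) n 1).foldl
        (fun s' c' => PySem.Set.add s' (pvPairSorted (pvLab r c) (pvLab r c'))) s' ↔
      p ∈ s' ∨ (∃ c', ((0 ≤ c' ∧ c' < c) ∨ (c + 1 ≤ c' ∧ c' < n)) ∧
        p = pvPairSorted (pvLab r c) (pvLab r c')) := by
    intro s'
    rw [pv_mem_foldl_iff _ (fun c' x => x = pvPairSorted (pvLab r c) (pvLab r c'))
      (fun s'' c' x => PySem.Set.mem_add s'' _ x)]
    simp [PySem.List.mem_pyRange_one]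
  have hrows : ∀ (s' : PySem.Set (String × String)),
      p ∈ (PySem.List.pyRange 0 r 1 ++ PySem.List.pyRange (r + 1) n 1).foldl
        (fun s' r' => PySem.Set.add s' (pvPairSorted (pvLab r c) (pvLab r' c))) s' ↔
      p ∈ s' ∨ (∃ r', ((0 ≤ r' ∧ r' < r) ∨ (r + 1 ≤ r' ∧ r' < n)) ∧
        p = pvPairSorted (pvLab r c) (pvLab r' c)) := by
    intro s'
    rw [pv_mem_foldl_iff _ (fun r' x => x = pvPairSorted (pvLab r c) (pvLab r' c))
      (fun s'' r' x => PySem.Set.mem_add s'' _ x)]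
    simp [PySem.List.mem_pyRange_one]
  cases proper with
  | false =>
    rw [if_neg (by simp)]
    rw [hrows, hcols]
    simp only [Bool.false_eq_true, false_and, or_false, or_assoc]
  | true =>
    rw [if_pos rfl]
    rw [pv_mem_ABox, hrows, hcols]
    simp only [true_and, or_assoc]

theorem pv_memA (n rs : Int) (proper : Bool) (p : String × String) :
    p ∈ (PySem.List.pyRange 0 n 1).foldl (fun s row_i =>
          (PySem.List.pyRange 0 n 1).foldl (fun s col_i =>
            pvACell n rs proper s row_i col_i) s) PySem.Set.empty ↔
      ∃ r c, 0 ≤ r ∧ r < n ∧ 0 ≤ c ∧ c < n ∧ QA n rs proper r c p := by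
  rw [pv_mem_foldl_iff _
    (fun r x => ∃ c, (0 ≤ c ∧ c < n) ∧ QA n rs proper r c x)
    (fun s' r x => by
      rw [pv_mem_foldl_iff _ (fun c x => QA n rs proper r c x)
        (fun s'' c x => pv_mem_ACell n rs proper r c s'' x)]
      simp only [PySem.List.mem_pyRange_one])]
  simp only [PySem.List.mem_pyRange_one]
  constructor
  · rintro (h | ⟨r, ⟨h0, h1⟩, c, ⟨h2, h3⟩, hq⟩)
    · simp [PySem.Set.empty] at h
    · exact ⟨r, c, h0, h1, h2, h3, hq⟩
  · rintro ⟨r, c, h0, h1, h2, h3, hq⟩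
    exact Or.inr ⟨r, ⟨h0, h1⟩, c, ⟨h2, h3⟩, hq⟩

-- B-side: a triangle loop adds exactly the pairs f i j, a ≤ i < j < b
theorem pv_mem_tri (a b : Int) (f : Int → Int → String × String)
    (init : PySem.Set (String × String)) (p : String × String) :
    p ∈ (PySem.List.pyRange a b 1).foldl (fun acc i =>
          (PySem.List.pyRange (i + 1) b 1).foldl (fun acc j =>
            PySem.Set.add acc (f i j)) acc) init ↔
      p ∈ init ∨ ∃ i j, a ≤ i ∧ i < j ∧ j < b ∧ p = f i j := by
  rw [pv_mem_foldl_iff _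
    (fun i x => ∃ j, (i + 1 ≤ j ∧ j < b) ∧ x = f i j)
    (fun s' i x => by
      rw [pv_mem_foldl_iff _ (fun j x => x = f i j)
        (fun s'' j x => PySem.Set.mem_add s'' _ x)]
      simp only [PySem.List.mem_pyRange_one])]
  simp only [PySem.List.mem_pyRange_one]
  constructor
  · rintro (h | ⟨i, ⟨h0, h1⟩, j, ⟨h2, h3⟩, hq⟩)
    · exact Or.inl h
    · exact Or.inr ⟨i, j, h0, by omega, h3, hq⟩
  · rintro (h | ⟨i, j, h0, h1, h2, hq⟩)
    · exact Or.inl h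
    · exact Or.inr ⟨i, ⟨h0, by omega⟩, j, ⟨by omega, h2⟩, hq⟩

theorem pv_mem_BBoxes (rs : Int) (s0 : PySem.Set (String × String)) (p : String × String) :
    p ∈ pvBBoxes rs s0 ↔ p ∈ s0 ∨ MBox rs p := by
  unfold pvBBoxes MBox
  simp only [pvAddPair_eq]
  rw [pv_mem_foldl_iff _
    (fun br x => ∃ bc, (0 ≤ bc ∧ bc < rs) ∧ ∃ k1 k2, 0 ≤ k1 ∧ k1 < k2 ∧ k2 < rs * rs ∧
      x = pvPairSorted
        (pvLab (br * rs + PySem.Int.floordiv k1 rs) (bc * rs + PySem.Int.mod k1 rs))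
        (pvLab (br * rs + PySem.Int.floordiv k2 rs) (bc * rs + PySem.Int.mod k2 rs)))
    (fun s' br x => by
      rw [pv_mem_foldl_iff _
        (fun bc x => ∃ k1 k2, 0 ≤ k1 ∧ k1 < k2 ∧ k2 < rs * rs ∧
          x = pvPairSorted
            (pvLab (br * rs + PySem.Int.floordiv k1 rs) (bc * rs + PySem.Int.mod k1 rs))
            (pvLab (br * rs + PySem.Int.floordiv k2 rs) (bc * rs + PySem.Int.mod k2 rs)))
        (fun s'' bc x => by rw [pv_mem_tri])]
      simp only [PySem.List.mem_pyRange_one])]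
  simp only [PySem.List.mem_pyRange_one]
  constructor
  · rintro (h | ⟨br, ⟨h0, h1⟩, bc, ⟨h2, h3⟩, k1, k2, hk⟩)
    · exact Or.inl h
    · exact Or.inr ⟨br, bc, k1, k2, h0, h1, h2, h3, hk.1, hk.2.1, hk.2.2.1, hk.2.2.2⟩
  · rintro (h | ⟨br, bc, k1, k2, h0, h1, h2, h3, h4, h5, h6, hq⟩)
    · exact Or.inl h
    · exact Or.inr ⟨br, ⟨h0, h1⟩, bc, ⟨h2, h3⟩, k1, k2, h4, h5, h6, hq⟩

theorem pv_mem_BRows (n : Int) (init : PySem.Set (String × String)) (p : String × String) :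
    p ∈ (PySem.List.pyRange 0 n 1).foldl (fun acc r =>
          (PySem.List.pyRange 0 n 1).foldl (fun acc c1 =>
            (PySem.List.pyRange (c1 + 1) n 1).foldl (fun acc c2 =>
              pvAddPair acc (pvLab r c1) (pvLab r c2)) acc) acc) init ↔
      p ∈ init ∨ MRow n p := by
  unfold MRow
  simp only [pvAddPair_eq]
  rw [pv_mem_foldl_iff _
    (fun r x => ∃ c c' : Int, 0 ≤ c ∧ c < c' ∧ c' < n ∧
      x = pvPairSorted (pvLab r c) (pvLab r c'))
    (fun s' r x => by rw [pv_mem_tri])]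
  simp only [PySem.List.mem_pyRange_one]
  constructor
  · rintro (h | ⟨r, ⟨h0, h1⟩, c, c', hq⟩)
    · exact Or.inl h
    · exact Or.inr ⟨r, c, c', h0, h1, hq.1, hq.2.1, hq.2.2.1, hq.2.2.2⟩
  · rintro (h | ⟨r, c, c', h0, h1, h2, h3, h4, hq⟩)
    · exact Or.inl h
    · exact Or.inr ⟨r, ⟨h0, h1⟩, c, c', h2, h3, h4, hq⟩

theorem pv_mem_BCols (n : Int) (init : PySem.Set (String × String)) (p : String × String) :
    p ∈ (PySem.List.pyRange 0 n 1).foldl (fun acc c =>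
          (PySem.List.pyRange 0 n 1).foldl (fun acc r1 =>
            (PySem.List.pyRange (r1 + 1) n 1).foldl (fun acc r2 =>
              pvAddPair acc (pvLab r1 c) (pvLab r2 c)) acc) acc) init ↔
      p ∈ init ∨ MCol n p := by
  unfold MCol
  simp only [pvAddPair_eq]
  rw [pv_mem_foldl_iff _
    (fun c x => ∃ r r' : Int, 0 ≤ r ∧ r < r' ∧ r' < n ∧
      x = pvPairSorted (pvLab r c) (pvLab r' c))
    (fun s' c x => by rw [pv_mem_tri])]
  simp only [PySem.List.mem_pyRange_one]
  constructor
  · rintro (h | ⟨c, ⟨h0, h1⟩, r, r', hq⟩)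
    · exact Or.inl h
    · exact Or.inr ⟨c, r, r', h0, h1, hq.1, hq.2.1, hq.2.2.1, hq.2.2.2⟩
  · rintro (h | ⟨c, r, r', h0, h1, h2, h3, h4, hq⟩)
    · exact Or.inl h
    · exact Or.inr ⟨c, ⟨h0, h1⟩, r, r', h2, h3, h4, hq⟩


-- Nodup of every accumulator
theorem pv_nodup_ABox (rs r c : Int) (s : PySem.Set (String × String)) (hs : s.Nodup) :
    (pvABoxStep rs r c s).Nodup := by
  unfold pvABoxStep
  exact pv_nodup_foldl _ (fun s' i h =>
    pv_nodup_foldl _ (fun s'' j h' => by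
      split_ifs
      · exact PySem.Set.nodup_add _ _ h'
      · exact h') _ _ h) _ _ hs

theorem pv_nodup_ACell (n rs : Int) (proper : Bool) (r c : Int)
    (s : PySem.Set (String × String)) (hs : s.Nodup) : (pvACell n rs proper s r c).Nodup := by
  simp only [pvACell]
  split_ifs
  · exact pv_nodup_ABox _ _ _ _
      (pv_nodup_foldl _ (fun _ _ h => PySem.Set.nodup_add _ _ h) _ _
        (pv_nodup_foldl _ (fun _ _ h => PySem.Set.nodup_add _ _ h) _ _ hs))
  · exact pv_nodup_foldl _ (fun _ _ h => PySem.Set.nodup_add _ _ h) _ _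
      (pv_nodup_foldl _ (fun _ _ h => PySem.Set.nodup_add _ _ h) _ _ hs)

theorem pv_nodup_A (n rs : Int) (proper : Bool) :
    ((PySem.List.pyRange 0 n 1).foldl (fun s row_i =>
      (PySem.List.pyRange 0 n 1).foldl (fun s col_i =>
        pvACell n rs proper s row_i col_i) s) PySem.Set.empty).Nodup :=
  pv_nodup_foldl _ (fun s' r h =>
    pv_nodup_foldl _ (fun s'' c h' => pv_nodup_ACell n rs proper r c s'' h') _ _ h) _ _
    (by simp [PySem.Set.empty])

theorem pv_nodup_tri (b : Int) (f : Int → Int → String × String)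
    (a : Int) (init : PySem.Set (String × String)) (h : init.Nodup) :
    ((PySem.List.pyRange a b 1).foldl (fun acc i =>
      (PySem.List.pyRange (i + 1) b 1).foldl (fun acc j =>
        PySem.Set.add acc (f i j)) acc) init).Nodup :=
  pv_nodup_foldl _ (fun s' i h' =>
    pv_nodup_foldl _ (fun _ _ h'' => PySem.Set.nodup_add _ _ h'') _ _ h') _ _ h

theorem pv_nodup_BBoxes (rs : Int) (s0 : PySem.Set (String × String)) (h : s0.Nodup) :
    (pvBBoxes rs s0).Nodup := by
  unfold pvBBoxes
  simp only [pvAddPair_eq]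
  exact pv_nodup_foldl _ (fun s' br h' =>
    pv_nodup_foldl _ (fun s'' bc h'' => pv_nodup_tri _ _ _ _ h'') _ _ h') _ _ h

-- div/mod of a linearised box offset
theorem pv_dm (rs i j : Int) (hpos : 0 < rs) (hj0 : 0 ≤ j) (hj1 : j < rs) :
    (i * rs + j) / rs = i ∧ (i * rs + j) % rs = j := by
  constructor
  · rw [add_comm, Int.add_mul_ediv_right _ _ (ne_of_gt hpos),
      Int.ediv_eq_zero_of_lt hj0 hj1, zero_add]
  · rw [add_comm, Int.add_mul_emod_self_right, Int.emod_eq_of_lt hj0 hj1]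

-- the heart: A's per-cell scan and B's per-group enumeration produce the same set
theorem pv_AB_iff (n rs : Int) (hrs : 0 ≤ rs) (p : String × String) :
    (∃ r c, 0 ≤ r ∧ r < n ∧ 0 ≤ c ∧ c < n ∧ QA n rs ((rs ^ 2 : Int) == n) r c p) ↔
      (MRow n p ∨ MCol n p ∨ (rs * rs = n ∧ MBox rs p)) := by
  constructor
  · rintro ⟨r, c, hr0, hr1, hc0, hc1, hq⟩
    rcases hq with ⟨c', hc', hp⟩ | ⟨r', hr', hp⟩ |
      ⟨hprop, i, ⟨hi0, hi1⟩, j, ⟨hj0, hj1⟩, hne, hp⟩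
    · left
      rcases hc' with ⟨h0, h1⟩ | ⟨h0, h1⟩
      · exact ⟨r, c', c, hr0, hr1, h0, h1, hc1, by rw [hp, pvPairSorted_comm]⟩
      · exact ⟨r, c, c', hr0, hr1, hc0, by omega, h1, hp⟩
    · right; left
      rcases hr' with ⟨h0, h1⟩ | ⟨h0, h1⟩
      · exact ⟨c, r', r, hc0, hc1, h0, h1, hr1, by rw [hp, pvPairSorted_comm]⟩
      · exact ⟨c, r, r', hc0, hc1, hr0, by omega, h1, hp⟩
    · right; right
      have hsq : rs * rs = n := by
        have := beq_iff_eq.mp hprop; rwa [pow_two] at this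
      refine ⟨hsq, ?_⟩
      have hpos : 0 < rs := by
        rcases lt_or_eq_of_le hrs with h | h
        · exact h
        · exfalso; rw [← h] at hsq; omega
      simp only [PySem.Int.floordiv_eq_ediv_of_pos hpos] at hne hp
      have hoi0 : 0 ≤ r % rs := Int.emod_nonneg r (ne_of_gt hpos)
      have hoi1 : r % rs < rs := Int.emod_lt_of_pos r hpos
      have hoj0 : 0 ≤ c % rs := Int.emod_nonneg c (ne_of_gt hpos)
      have hoj1 : c % rs < rs := Int.emod_lt_of_pos c hpos
      have hbr0 : 0 ≤ r / rs := Int.ediv_nonneg hr0 hrs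
      have hbc0 : 0 ≤ c / rs := Int.ediv_nonneg hc0 hrs
      have hbr1 : r / rs < rs := (Int.ediv_lt_iff_lt_mul hpos).mpr (by omega)
      have hbc1 : c / rs < rs := (Int.ediv_lt_iff_lt_mul hpos).mpr (by omega)
      have hrdm : rs * (r / rs) + r % rs = r := Int.ediv_add_emod r rs
      have hcdm : rs * (c / rs) + c % rs = c := Int.ediv_add_emod c rs
      have hka := pv_dm rs (r % rs) (c % rs) hpos hoj0 hoj1
      have hkb := pv_dm rs i j hpos hj0 hj1
      have hr_eq : r / rs * rs + r % rs = r := by rw [mul_comm]; exact hrdm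
      have hc_eq : c / rs * rs + c % rs = c := by rw [mul_comm]; exact hcdm
      have hcell : pvLab r c =
          pvLab (r / rs * rs + (r % rs * rs + c % rs) / rs)
                (c / rs * rs + (r % rs * rs + c % rs) % rs) := by
        rw [hka.1, hka.2, hr_eq, hc_eq]
      have hngb : pvLab (r / rs * rs + i) (c / rs * rs + j) =
          pvLab (r / rs * rs + (i * rs + j) / rs)
                (c / rs * rs + (i * rs + j) % rs) := by
        rw [hkb.1, hkb.2]
      have hne' : r % rs * rs + c % rs ≠ i * rs + j := by
        intro heq
        have h1 : r % rs = i := by rw [← hka.1, heq, hkb.1]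
        have h2 : c % rs = j := by rw [← hka.2, heq, hkb.2]
        rcases hne with h | h
        · exact h (by rw [← h1]; exact hr_eq)
        · exact h (by rw [← h2]; exact hc_eq)
      have hkab : r % rs * rs + c % rs < rs * rs ∧ i * rs + j < rs * rs := by
        constructor <;> nlinarith
      have hka0 : 0 ≤ r % rs * rs + c % rs := by nlinarith
      have hkb0 : 0 ≤ i * rs + j := by nlinarith
      unfold MBox
      simp only [PySem.Int.floordiv_eq_ediv_of_pos hpos, PySem.Int.mod_eq_emod_of_pos hpos]
      rcases lt_trichotomy (r % rs * rs + c % rs) (i * rs + j) with hlt | heq | hgt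
      · exact ⟨r / rs, c / rs, r % rs * rs + c % rs, i * rs + j,
          hbr0, hbr1, hbc0, hbc1, hka0, hlt, hkab.2, by rw [hp, hcell, hngb]⟩
      · exact absurd heq hne'
      · exact ⟨r / rs, c / rs, i * rs + j, r % rs * rs + c % rs,
          hbr0, hbr1, hbc0, hbc1, hkb0, hgt, hkab.1,
          by rw [hp, hcell, hngb, pvPairSorted_comm]⟩
  · rintro (⟨r, c, c', h0, h1, h2, h3, h4, hp⟩ | ⟨c, r, r', h0, h1, h2, h3, h4, hp⟩ |
      ⟨hsq, br, bc, k1, k2, hbr0, hbr1, hbc0, hbc1, hk10, hk12, hk2, hp⟩)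
    · exact ⟨r, c, h0, h1, h2, by omega, Or.inl ⟨c', Or.inr ⟨by omega, h4⟩, hp⟩⟩
    · exact ⟨r, c, h2, by omega, h0, h1, Or.inr (Or.inl ⟨r', Or.inr ⟨by omega, h4⟩, hp⟩)⟩
    · have hpos : 0 < rs := by
        rcases lt_or_eq_of_le hrs with h | h
        · exact h
        · exfalso; rw [← h] at hk2; omega
      have hprop : ((rs ^ 2 : Int) == n) = true := beq_iff_eq.mpr (by rw [pow_two]; exact hsq)
      have hd10 : 0 ≤ k1 % rs := Int.emod_nonneg k1 (ne_of_gt hpos)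
      have hd11 : k1 % rs < rs := Int.emod_lt_of_pos k1 hpos
      have hd20 : 0 ≤ k2 % rs := Int.emod_nonneg k2 (ne_of_gt hpos)
      have hd21 : k2 % rs < rs := Int.emod_lt_of_pos k2 hpos
      have he10 : 0 ≤ k1 / rs := Int.ediv_nonneg (by omega) hrs
      have he20 : 0 ≤ k2 / rs := Int.ediv_nonneg (by omega) hrs
      have he11 : k1 / rs < rs := (Int.ediv_lt_iff_lt_mul hpos).mpr (by omega)
      have he21 : k2 / rs < rs := (Int.ediv_lt_iff_lt_mul hpos).mpr (by omega)
      have h1dm : rs * (k1 / rs) + k1 % rs = k1 := Int.ediv_add_emod k1 rs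
      have h2dm : rs * (k2 / rs) + k2 % rs = k2 := Int.ediv_add_emod k2 rs
      refine ⟨br * rs + k1 / rs, bc * rs + k1 % rs, ?_, ?_, ?_, ?_, ?_⟩
      · positivity
      · rw [← hsq]; nlinarith
      · positivity
      · rw [← hsq]; nlinarith
      · right; right
        refine ⟨hprop, ?_⟩
        have hr_div := pv_dm rs br (k1 / rs) hpos he10 he11
        have hc_div := pv_dm rs bc (k1 % rs) hpos hd10 hd11
        have hfr : PySem.Int.floordiv (br * rs + k1 / rs) rs * rs = br * rs := by
          rw [PySem.Int.floordiv_eq_ediv_of_pos hpos, hr_div.1]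
        have hfc : PySem.Int.floordiv (bc * rs + k1 % rs) rs * rs = bc * rs := by
          rw [PySem.Int.floordiv_eq_ediv_of_pos hpos, hc_div.1]
        refine ⟨k2 / rs, ⟨he20, he21⟩, k2 % rs, ⟨hd20, hd21⟩, ?_, ?_⟩
        · rw [hfr, hfc]
          by_contra hcon
          push_neg at hcon
          rcases hcon with ⟨ha, hb⟩
          have e1 : k2 / rs = k1 / rs := by omega
          have e2 : k2 % rs = k1 % rs := by omega
          have : k2 = k1 := by
            calc k2 = rs * (k2 / rs) + k2 % rs := h2dm.symm
              _ = rs * (k1 / rs) + k1 % rs := by rw [e1, e2]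
              _ = k1 := h1dm
          omega
        · rw [hfr, hfc, hp]
          rw [PySem.Int.floordiv_eq_ediv_of_pos hpos (a := k1),
            PySem.Int.floordiv_eq_ediv_of_pos hpos (a := k2),
            PySem.Int.mod_eq_emod_of_pos hpos (a := k1),
            PySem.Int.mod_eq_emod_of_pos hpos (a := k2)]

-- membership in B's final set
theorem pv_memB (n rs : Int) (p : String × String) :
    p ∈ (if ((rs * rs : Int) == n) then
          pvBBoxes rs
            ((PySem.List.pyRange 0 n 1).foldl (fun acc c =>
              (PySem.List.pyRange 0 n 1).foldl (fun acc r1 =>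
                (PySem.List.pyRange (r1 + 1) n 1).foldl (fun acc r2 =>
                  pvAddPair acc (pvLab r1 c) (pvLab r2 c)) acc) acc)
              ((PySem.List.pyRange 0 n 1).foldl (fun acc r =>
                (PySem.List.pyRange 0 n 1).foldl (fun acc c1 =>
                  (PySem.List.pyRange (c1 + 1) n 1).foldl (fun acc c2 =>
                    pvAddPair acc (pvLab r c1) (pvLab r c2)) acc) acc) PySem.Set.empty))
        else
          ((PySem.List.pyRange 0 n 1).foldl (fun acc c =>
            (PySem.List.pyRange 0 n 1).foldl (fun acc r1 =>
              (PySem.List.pyRange (r1 + 1) n 1).foldl (fun acc r2 =>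
                pvAddPair acc (pvLab r1 c) (pvLab r2 c)) acc) acc)
            ((PySem.List.pyRange 0 n 1).foldl (fun acc r =>
              (PySem.List.pyRange 0 n 1).foldl (fun acc c1 =>
                (PySem.List.pyRange (c1 + 1) n 1).foldl (fun acc c2 =>
                  pvAddPair acc (pvLab r c1) (pvLab r c2)) acc) acc) PySem.Set.empty))) ↔
      (MRow n p ∨ MCol n p ∨ (rs * rs = n ∧ MBox rs p)) := by
  by_cases hsq : (rs * rs : Int) = n
  · rw [if_pos (beq_iff_eq.mpr hsq), pv_mem_BBoxes, pv_mem_BCols, pv_mem_BRows]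
    simp [PySem.Set.empty, hsq, or_assoc]
  · rw [if_neg (by simpa using hsq), pv_mem_BCols, pv_mem_BRows]
    simp [PySem.Set.empty, hsq, or_assoc]

theorem pv_nodup_B (n rs : Int) :
    (if ((rs * rs : Int) == n) then
        pvBBoxes rs
          ((PySem.List.pyRange 0 n 1).foldl (fun acc c =>
            (PySem.List.pyRange 0 n 1).foldl (fun acc r1 =>
              (PySem.List.pyRange (r1 + 1) n 1).foldl (fun acc r2 =>
                pvAddPair acc (pvLab r1 c) (pvLab r2 c)) acc) acc)
            ((PySem.List.pyRange 0 n 1).foldl (fun acc r =>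
              (PySem.List.pyRange 0 n 1).foldl (fun acc c1 =>
                (PySem.List.pyRange (c1 + 1) n 1).foldl (fun acc c2 =>
                  pvAddPair acc (pvLab r c1) (pvLab r c2)) acc) acc) PySem.Set.empty))
      else
        ((PySem.List.pyRange 0 n 1).foldl (fun acc c =>
          (PySem.List.pyRange 0 n 1).foldl (fun acc r1 =>
            (PySem.List.pyRange (r1 + 1) n 1).foldl (fun acc r2 =>
              pvAddPair acc (pvLab r1 c) (pvLab r2 c)) acc) acc)
          ((PySem.List.pyRange 0 n 1).foldl (fun acc r =>
            (PySem.List.pyRange 0 n 1).foldl (fun acc c1 =>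
              (PySem.List.pyRange (c1 + 1) n 1).foldl (fun acc c2 =>
                pvAddPair acc (pvLab r c1) (pvLab r c2)) acc) acc) PySem.Set.empty))).Nodup := by
  have h0 : (PySem.Set.empty : PySem.Set (String × String)).Nodup := by simp [PySem.Set.empty]
  have h1 := pv_nodup_foldl
    (fun acc r => (PySem.List.pyRange 0 n 1).foldl (fun acc c1 =>
      (PySem.List.pyRange (c1 + 1) n 1).foldl (fun acc c2 =>
        pvAddPair acc (pvLab r c1) (pvLab r c2)) acc) acc)
    (fun s' r h => by
      simp only [pvAddPair_eq]
      exact pv_nodup_foldl _ (fun s'' c1 h' =>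
        pv_nodup_foldl _ (fun _ _ h'' => PySem.Set.nodup_add _ _ h'') _ _ h') _ _ h)
    (PySem.List.pyRange 0 n 1) _ h0
  have h2 := pv_nodup_foldl
    (fun acc c => (PySem.List.pyRange 0 n 1).foldl (fun acc r1 =>
      (PySem.List.pyRange (r1 + 1) n 1).foldl (fun acc r2 =>
        pvAddPair acc (pvLab r1 c) (pvLab r2 c)) acc) acc)
    (fun s' c h => by
      simp only [pvAddPair_eq]
      exact pv_nodup_foldl _ (fun s'' r1 h' =>
        pv_nodup_foldl _ (fun _ _ h'' => PySem.Set.nodup_add _ _ h'') _ _ h') _ _ h)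
    (PySem.List.pyRange 0 n 1) _ h1
  split_ifs
  · exact pv_nodup_BBoxes _ _ h2
  · exact h2

-- ===== VERDICT (by name: the statement is the Claim_ definition above) =====
theorem get_inequality_constraints_spec : Claim_equal_get_inequality_constraints := by
  intro grid _
  unfold Spec_get_inequality_constraints
  simp only [get_inequality_constraints, get_inequality_constraints_alt]
  rw [pv_sorted2_lex, pv_sorted2_lex]
  apply PySem.List.sorted_eq_sorted_of_perm _ _ _ toLex.injective
  rw [List.perm_ext_iff_of_nodup (pv_nodup_A _ _ _) (pv_nodup_B _ _)]
  intro p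
  rw [pv_memA, pv_memB]
  exact pv_AB_iff (PySem.List.len grid) ((Nat.sqrt grid.length : Int)) (Int.natCast_nonneg _) p
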